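-- pv_equiv track=rewrite | github.com/elastic/enterprise-search-microsoft-outlook-connector | ees_microsoft_outlook/sync_enterprise_search.py | get_records_by_types
-- ===== SOURCE A (Python) =====
-- import collections
--
-- def get_records_by_types(documents):
--     """This method is used to for grouping the document based on their type
--     :param documents: Document to be indexed
--     Returns:
--          df_dict: Dictionary of type with its count
--     """
--     dict_count = {}
--     if not documents:
--         return {}
--     grouped_documents = collections.defaultdict(list)
--     for item in documents:
--         grouped_documents[item["type"]].append(item)
--     for model, group in grouped_documents.items():
--         dict_count[model] = len(group)
--     return dict_count
-- ===== SOURCE B (Python) =====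
-- def get_records_by_types(documents):
--     """Staged nested-scan version: no hashing/grouping at all. First list the
--     types, keep first occurrences in order, then count each distinct type by
--     scanning the type list with list.count."""
--     types = [item["type"] for item in documents]
--     distinct = []
--     for t in types:
--         if t not in distinct:
--             distinct.append(t)
--     return {t: types.count(t) for t in distinct}
-- ===== Notes on version B (the rewrite author's own statement) =====
-- stated objective: alternative
-- what changed: Replaces A's hash grouping (defaultdict of lists, then a length pass over the groups) by a hash-free nested-scan algorithm: stage 1 extracts the type list and its first-occurrence distinct types kept in order, stage 2 counts each distinct type with a full list.count scan; no dict or grouped lists are built during counting.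
import Mathlib
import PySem

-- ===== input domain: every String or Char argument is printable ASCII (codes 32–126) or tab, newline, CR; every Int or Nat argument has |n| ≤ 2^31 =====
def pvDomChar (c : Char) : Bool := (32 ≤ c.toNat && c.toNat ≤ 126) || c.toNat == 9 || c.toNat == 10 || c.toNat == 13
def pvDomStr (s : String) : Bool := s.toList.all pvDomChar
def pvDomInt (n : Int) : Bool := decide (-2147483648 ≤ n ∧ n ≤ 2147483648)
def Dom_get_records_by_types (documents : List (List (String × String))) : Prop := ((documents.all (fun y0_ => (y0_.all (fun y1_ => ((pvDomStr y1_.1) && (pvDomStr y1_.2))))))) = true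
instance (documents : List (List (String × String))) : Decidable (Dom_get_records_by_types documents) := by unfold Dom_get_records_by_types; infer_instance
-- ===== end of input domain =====

-- B replaces A's hash grouping (defaultdict of lists + a length pass) by a
-- hash-free nested-scan algorithm: ordered first-occurrence distinct types,
-- then a full list.count scan per distinct type (objective: alternative).
-- Pre_ excludes items without a "type" key, where the Python A raises KeyError.

-- item["type"]; total form used by both ports (Pre_ guarantees the key is present)
def pvTypeKey (item : List (String × String)) : String :=
  ((PySem.Dict.mk item).get? "type").getD ""

-- ===== PORT A =====
def get_records_by_types (documents : List (List (String × String))) : List (String × Int) :=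
  if documents = [] then []
  else
    -- grouped_documents = defaultdict(list); grouped_documents[item["type"]].append(item)
    let grouped : PySem.Dict String (List (List (String × String))) :=
      documents.foldl (fun g item => g.modify (pvTypeKey item) [] (· ++ [item])) PySem.Dict.empty
    -- for model, group in grouped.items(): dict_count[model] = len(group)
    (grouped.items.foldl
      (fun dc p => dc.insert p.1 (Int.ofNat p.2.length))
      (PySem.Dict.empty : PySem.Dict String Int)).items

-- ===== PORT B =====
def get_records_by_types_alt (documents : List (List (String × String))) : List (String × Int) :=
  -- types = [item["type"] for item in documents]
  let types := documents.map pvTypeKey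
  -- distinct = []; for t in types: if t not in distinct: distinct.append(t)
  let distinct := types.foldl (fun s t => if s.contains t then s else s ++ [t]) []
  -- {t: types.count(t) for t in distinct}
  (distinct.foldl
    (fun d t => d.insert t ((types.count t : Int)))
    (PySem.Dict.empty : PySem.Dict String Int)).items

-- ===== PRECONDITION & SPEC =====
-- Pre_ excludes exactly the inputs where some item lacks the "type" key: there Python A raises KeyError.
def Pre_get_records_by_types (documents : List (List (String × String))) : Prop :=
  ∀ item ∈ documents, (PySem.Dict.mk item).contains "type" = true
instance (documents : List (List (String × String))) : Decidable (Pre_get_records_by_types documents) := by unfold Pre_get_records_by_types; infer_instance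
def pvWitness_get_records_by_types : (List (List (String × String))) := [[("type", "mails")], [("type", "calendar")], [("type", "mails")]]

def Spec_get_records_by_types (documents : List (List (String × String))) (out : List (String × Int)) : Prop := out = get_records_by_types_alt documents
instance (documents : List (List (String × String))) (out : List (String × Int)) : Decidable (Spec_get_records_by_types documents out) := by unfold Spec_get_records_by_types; infer_instance

-- ===== CLAIM (what is proved, stated in full; the proofs are below) =====
def Claim_equal_get_records_by_types : Prop := ∀ (documents : List (List (String × String))), Dom_get_records_by_types documents → Pre_get_records_by_types documents → Spec_get_records_by_types documents (get_records_by_types documents)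

-- ===== LEMMAS AND PROOFS =====

-- B's distinct-keyed comprehension, written out: first-occurrence distinct types
-- paired with their full-scan counts
lemma alt_eq_map (documents : List (List (String × String))) :
    get_records_by_types_alt documents =
      (PySem.Set.ofList (documents.map pvTypeKey)).map
        (fun k => (k, ((documents.map pvTypeKey).count k : Int))) := by
  set types := documents.map pvTypeKey with htypes
  -- B's dedup loop is definitionally PySem.Set.ofList types
  have hshow : get_records_by_types_alt documents =
      ((PySem.Set.ofList types).foldl
        (fun d t => d.insert t ((types.count t : Int)))
        (PySem.Dict.empty : PySem.Dict String Int)).items := rfl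
  rw [hshow]
  have hfresh : ∀ t ∈ PySem.Set.ofList types,
      (PySem.Dict.empty : PySem.Dict String Int).contains t = false := by
    intro t _; simp
  have hnodup : ((PySem.Set.ofList types).map (fun t => t)).Nodup := by
    simpa using PySem.Set.nodup_ofList (xs := types)
  have hstep := PySem.Dict.items_foldl_insert_fresh
      (l := PySem.Set.ofList types) (k := fun t => t)
      (v := fun t => (types.count t : Int))
      (d := (PySem.Dict.empty : PySem.Dict String Int)) hfresh hnodup
  simpa using hstep

-- A's result: each key of the grouped dict paired with its group length
lemma a_eq_items (documents : List (List (String × String))) (h : documents ≠ []) :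
    get_records_by_types documents =
      (PySem.Set.ofList (documents.map pvTypeKey)).map
        (fun k => (k, ((documents.map pvTypeKey).count k : Int))) := by
  unfold get_records_by_types
  rw [if_neg h]
  have hg :
      documents.foldl (fun g item => g.modify (pvTypeKey item) [] (· ++ [item]))
          (PySem.Dict.empty : PySem.Dict String (List (List (String × String)))) =
        (documents.map (fun item => (pvTypeKey item, item))).foldl
          (fun g p => g.modify p.1 [] (· ++ [p.2])) PySem.Dict.empty := by
    rw [List.foldl_map]
  set l := documents.map (fun item => (pvTypeKey item, item)) with hl
  rw [hg]
  set g := l.foldl (fun g p => g.modify p.1 [] (· ++ [p.2]))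
      (PySem.Dict.empty : PySem.Dict String (List (List (String × String)))) with hgdef
  have hnodup : g.keys.Nodup := by
    rw [hgdef, hl, List.foldl_map]
    exact PySem.Dict.nodup_keys_foldl_modify_key documents pvTypeKey []
      (fun d x => (· ++ [x])) PySem.Dict.empty (by simp)
  -- second loop over g.items inserts fresh distinct keys into an empty dict
  have hkeys1 : g.items.map (·.1) = g.keys := rfl
  have hfresh : ∀ p ∈ g.items, (PySem.Dict.empty : PySem.Dict String Int).contains (p.1) = false := by
    intro p _; simp
  have hstep := PySem.Dict.items_foldl_insert_fresh (l := g.items)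
      (k := fun p => p.1) (v := fun p => Int.ofNat p.2.length)
      (d := (PySem.Dict.empty : PySem.Dict String Int)) hfresh (by rw [hkeys1]; exact hnodup)
  rw [hstep]
  have hkeys : g.keys = PySem.Set.ofList (documents.map pvTypeKey) := by
    rw [hgdef, hl, List.foldl_map]
    rw [PySem.Dict.keys_foldl_modify_key (l := documents) (key := pvTypeKey)
        (d0 := ([] : List (List (String × String)))) (f := fun d x => (· ++ [x]))
        (d := PySem.Dict.empty)]
    exact PySem.Set.update_nil_left _
  have hitems : g.items = g.keys.map (fun k => (k, g.getD k [])) :=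
    PySem.Dict.items_eq_map_keys g hnodup []
  have hval : ∀ k, (g.getD k []).length = (documents.map pvTypeKey).count k := by
    intro k
    rw [hgdef]
    rw [PySem.Dict.getD_foldl_modify_append (l := l) (d := PySem.Dict.empty) (c := k)]
    simp only [PySem.Dict.getD_empty, List.nil_append, List.length_map, hl]
    rw [← List.countP_eq_length_filter, List.count_eq_countP, List.countP_map, List.countP_map]
    rfl
  rw [hitems, hkeys]
  simp only [List.map_map, pysem]
  apply List.map_congr_left
  intro k _
  simp only [Function.comp_apply]
  rw [hval k]
  rfl

-- ===== VERDICT (by name: the statement is the Claim_ definition above) =====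
theorem get_records_by_types_spec : Claim_equal_get_records_by_types := by
  intro documents _ _
  unfold Spec_get_records_by_types
  by_cases h : documents = []
  · subst h; rfl
  · rw [a_eq_items documents h, alt_eq_map]
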